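-- pv_equiv track=rewrite | github.com/Shin-jay7/AtCoder_Python3 | StrangeBank.py | dfs
-- ===== SOURCE A (Python) =====
-- from itertools import count, takewhile
--
-- def dfs(n, d={}):
--     if n < 6:
--         return n
--
--     if n in d:
--         return d[n]
--
--     max9 = max(takewhile(lambda x: x<=n, (9**i for i in count())))
--     max6 = max(takewhile(lambda x: x<=n, (6**i for i in count())))
--     d[n] = min(dfs(n-max9), dfs(n-max6)) + 1
--
--     return d[n]
-- ===== SOURCE B (Python) =====
-- # Two-phase iterative algorithm instead of A's memoized recursive DFS:
-- # phase 1 collects every state the recurrence can reach with an explicit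
-- # worklist, phase 2 evaluates the recurrence bottom-up over the reachable
-- # states in increasing order.  Note: A's recursive calls use the DEFAULT dict,
-- # not the passed d, so d only affects the top-level key lookup; A also mutates
-- # the caller's d (d[n] = ...) -- B does not, equivalence is about the return value.
-- def dfs(n, d={}):
--     if n < 6:
--         return n
--     if n in d:
--         return d[n]
--
--     def largest(b, k):
--         p = 1
--         while p * b <= k:
--             p *= b
--         return p
--
--     seen = set()
--     stack = [n]
--     while stack:
--         k = stack.pop()
--         if k < 6 or k in seen:
--             continue
--         seen.add(k)
--         stack.append(k - largest(9, k))
--         stack.append(k - largest(6, k))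
--
--     val = {}
--     for k in sorted(seen):
--         c9 = k - largest(9, k)
--         c6 = k - largest(6, k)
--         a = c9 if c9 < 6 else val[c9]
--         b = c6 if c6 < 6 else val[c6]
--         val[k] = min(a, b) + 1
--     return val[n]
-- ===== Notes on version B (the rewrite author's own statement) =====
-- stated objective: alternative
-- what changed: Replaces the memoized recursive DFS by an iterative two-phase algorithm: an explicit-worklist pass collects the set of states reachable by subtracting the largest power of 9 or 6, then the recurrence is evaluated bottom-up over those states in increasing order; the passed d is consulted only for the top-level key, exactly as in A, whose recursive calls use the shared default dict rather than the passed d (A also mutates the caller's d; B does not, equivalence is about the return value).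
import Mathlib
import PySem

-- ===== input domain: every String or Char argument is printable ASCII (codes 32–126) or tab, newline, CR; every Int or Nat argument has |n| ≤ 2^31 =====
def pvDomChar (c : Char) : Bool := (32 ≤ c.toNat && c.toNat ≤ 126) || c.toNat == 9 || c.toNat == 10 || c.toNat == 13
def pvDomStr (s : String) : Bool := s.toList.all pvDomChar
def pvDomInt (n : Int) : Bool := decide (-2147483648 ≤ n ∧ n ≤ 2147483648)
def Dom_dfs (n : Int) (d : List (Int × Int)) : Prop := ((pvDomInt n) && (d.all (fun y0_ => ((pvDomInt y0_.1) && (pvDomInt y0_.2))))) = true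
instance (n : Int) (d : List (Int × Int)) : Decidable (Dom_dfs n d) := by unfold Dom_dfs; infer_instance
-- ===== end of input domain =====

-- B replaces A's memoized recursive DFS by an iterative two-phase algorithm: a worklist collecting
-- the reachable states, then a bottom-up evaluation over those states in increasing order.
-- Return-value equivalence only: Python A writes d[n] into the caller's dict, B does not mutate d.
-- NOTE on A: its recursive calls `dfs(n-max9)` pass no dict, so they use the shared DEFAULT dict,
-- never the passed d; that memo only ever holds values of the d-free recurrence, so the port models
-- those inner calls with a fresh memo threaded through (dfsGo) — value-exact for every call.

-- ===== PORT A =====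
-- max(takewhile(lambda x: x<=n, (b**i for i in count()))): the largest power b^i ≤ n, reached by
-- repeated multiplication from p = b^0 = 1, exactly as the generator enumerates powers; the
-- `1 ≤ p ∧ 2 ≤ b` parts of the guard only make the recursion total (true on all of A's calls).
-- the decrease fact for the repeated-multiplication loops (cited in decreasing_by)
theorem pvMulDec (b n p : Int) (h : 1 ≤ p ∧ 2 ≤ b ∧ p * b ≤ n) :
    (n - p * b).toNat < (n - p).toNat := by
  have h2 : p * 2 ≤ p * b := mul_le_mul_of_nonneg_left h.2.1 (by omega)
  omega

def pvMaxPow (b n p : Int) : Int :=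
  if h : 1 ≤ p ∧ 2 ≤ b ∧ p * b ≤ n then pvMaxPow b n (p * b) else p
termination_by (n - p).toNat
decreasing_by exact pvMulDec b n p h

-- the two facts the termination proofs need
theorem pvMaxPow_one_le (b n p : Int) (hp : 1 ≤ p) : p ≤ pvMaxPow b n p := by
  fun_induction pvMaxPow b n p with
  | case1 p h ih => nlinarith [ih (by nlinarith [h.1, h.2.1]), h.1, h.2.1]
  | case2 p h => omega

theorem pvMaxPow_le_self (b n p : Int) (hp : p ≤ n) : pvMaxPow b n p ≤ n := by
  fun_induction pvMaxPow b n p with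
  | case1 p h ih => exact ih h.2.2
  | case2 p h => omega

-- the decrease facts for dfsGo's / pvF's recursive calls (cited in decreasing_by)
theorem pvStep9Dec (n : Int) (h : ¬ n < 6) : (n - pvMaxPow 9 n 1).toNat < n.toNat := by
  have h1 := pvMaxPow_one_le 9 n 1 (by omega)
  have h2 := pvMaxPow_le_self 9 n 1 (by omega)
  omega

theorem pvStep6Dec (n : Int) (h : ¬ n < 6) : (n - pvMaxPow 6 n 1).toNat < n.toNat := by
  have h1 := pvMaxPow_one_le 6 n 1 (by omega)
  have h2 := pvMaxPow_le_self 6 n 1 (by omega)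
  omega

-- the inner recursion of A: `dfs` called with the default dict as memo, threaded explicitly
def dfsGo (n : Int) (m : List (Int × Int)) : Int × List (Int × Int) :=
  if n < 6 then (n, m)
  else
    match List.lookup n m with
    | some v => (v, m)
    | none =>
      let max9 := pvMaxPow 9 n 1
      let max6 := pvMaxPow 6 n 1
      let r9 := dfsGo (n - max9) m
      let r6 := dfsGo (n - max6) r9.2
      let v := min r9.1 r6.1 + 1
      (v, r6.2 ++ [(n, v)])   -- d[n] = v : n is absent here, so the dict appends the new key
termination_by n.toNat
decreasing_by
  · exact pvStep9Dec n (by omega)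
  · exact pvStep6Dec n (by omega)

def dfs (n : Int) (d : List (Int × Int)) : Int :=
  if n < 6 then n
  else
    match List.lookup n d with   -- `if n in d: return d[n]`
    | some v => v
    | none =>
      -- min(dfs(n-max9), dfs(n-max6)) + 1, both inner calls on the default dict
      let max9 := pvMaxPow 9 n 1
      let max6 := pvMaxPow 6 n 1
      let r9 := dfsGo (n - max9) []
      let r6 := dfsGo (n - max6) r9.2
      min r9.1 r6.1 + 1

-- ===== PORT B =====
-- Source B's largest(b, k): p = 1; while p*b <= k: p *= b  (same total-making guard parts as above)
def pvLargest (b k p : Int) : Int :=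
  if h : 1 ≤ p ∧ 2 ≤ b ∧ p * b ≤ k then pvLargest b k (p * b) else p
termination_by (k - p).toNat
decreasing_by exact pvMulDec b k p h

-- bounds used by pvCollect's termination measure (cited in its decreasing_by)
theorem pvLargest_one_le (b k p : Int) (hp : 1 ≤ p) : p ≤ pvLargest b k p := by
  fun_induction pvLargest b k p with
  | case1 p h ih => nlinarith [ih (by nlinarith [h.1, h.2.1]), h.1, h.2.1]
  | case2 p h => omega

theorem pvLargest_le_self (b k p : Int) (hp : p ≤ k) : pvLargest b k p ≤ k := by
  fun_induction pvLargest b k p with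
  | case1 p h ih => exact ih h.2.2
  | case2 p h => omega

-- the decrease facts for the worklist loop (cited in pvCollect's decreasing_by)
theorem pvCollectDecSkip (k : Int) (rest : List Int) :
    ((rest.map fun x => 3 ^ x.toNat).sum) < (((k :: rest).map fun x => 3 ^ x.toNat).sum) := by
  have h1 : 1 ≤ 3 ^ k.toNat := Nat.one_le_pow _ _ (by norm_num)
  simp only [List.map_cons, List.sum_cons]
  omega

theorem pvCollectDecPush (k : Int) (rest : List Int) (hk : 6 ≤ k) :
    ((((k - pvLargest 6 k 1) :: (k - pvLargest 9 k 1) :: rest).map fun x => 3 ^ x.toNat).sum)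
      < (((k :: rest).map fun x => 3 ^ x.toNat).sum) := by
  have a9 := pvLargest_one_le 9 k 1 (by omega)
  have b9 := pvLargest_le_self 9 k 1 (by omega)
  have a6 := pvLargest_one_le 6 k 1 (by omega)
  have b6 := pvLargest_le_self 6 k 1 (by omega)
  have e9 : (k - pvLargest 9 k 1).toNat ≤ k.toNat - 1 := by omega
  have e6 : (k - pvLargest 6 k 1).toNat ≤ k.toNat - 1 := by omega
  have p9 : 3 ^ (k - pvLargest 9 k 1).toNat ≤ 3 ^ (k.toNat - 1) :=
    Nat.pow_le_pow_right (by norm_num) e9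
  have p6 : 3 ^ (k - pvLargest 6 k 1).toNat ≤ 3 ^ (k.toNat - 1) :=
    Nat.pow_le_pow_right (by norm_num) e6
  have hk3 : 3 ^ k.toNat = 3 ^ (k.toNat - 1) * 3 := by
    rw [← pow_succ]
    congr 1
    omega
  have ha1 : 1 ≤ 3 ^ (k.toNat - 1) := Nat.one_le_pow _ _ (by norm_num)
  simp only [List.map_cons, List.sum_cons]
  omega

-- phase 1: the worklist loop collecting every reachable state ≥ 6
-- (Source B pushes the 9-child then the 6-child and pops the last, so the 6-child is on top)
def pvCollect (seen : List Int) (stack : List Int) : List Int :=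
  match stack with
  | [] => seen
  | k :: rest =>
      if h : k < 6 ∨ k ∈ seen then pvCollect seen rest
      else pvCollect (PySem.Set.add seen k)
        ((k - pvLargest 6 k 1) :: (k - pvLargest 9 k 1) :: rest)
termination_by (stack.map fun x => 3 ^ x.toNat).sum
decreasing_by
  · exact pvCollectDecSkip k rest
  · exact pvCollectDecPush k rest (by rcases not_or.mp h with ⟨h1, _⟩; omega)


-- phase 2: one iteration of `for k in sorted(seen)` — val is an insertion-ordered dict,
-- so a new key appends; the looked-up child is always present, `.getD 0` only totalises
def pvEvalStep (acc : List (Int × Int)) (k : Int) : List (Int × Int) :=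
  let c9 := k - pvLargest 9 k 1
  let c6 := k - pvLargest 6 k 1
  let a := if c9 < 6 then c9 else (List.lookup c9 acc).getD 0
  let b := if c6 < 6 then c6 else (List.lookup c6 acc).getD 0
  acc ++ [(k, min a b + 1)]

def dfs_alt (n : Int) (d : List (Int × Int)) : Int :=
  if n < 6 then n
  else
    match List.lookup n d with   -- `if n in d: return d[n]`
    | some v => v
    | none =>
      let seen := pvCollect [] [n]
      let val := (PySem.List.sorted seen (fun x => x) false).foldl pvEvalStep []
      (List.lookup n val).getD 0   -- return val[n]; n is always present, `.getD 0` only totalises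

-- ===== PRECONDITION & SPEC =====
def Spec_dfs (n : Int) (d : List (Int × Int)) (out : Int) : Prop := out = dfs_alt n d
instance (n : Int) (d : List (Int × Int)) (out : Int) : Decidable (Spec_dfs n d out) := by unfold Spec_dfs; infer_instance

-- ===== CLAIM (what is proved, stated in full; the proofs are below) =====
def Claim_equal_dfs : Prop := ∀ (n : Int) (d : List (Int × Int)), Dom_dfs n d → Spec_dfs n d (dfs n d)

-- ===== LEMMAS AND PROOFS =====

theorem pvLargest_eq (b k p : Int) : pvLargest b k p = pvMaxPow b k p := by
  fun_induction pvLargest b k p with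
  | case1 p h ih => rw [pvMaxPow, dif_pos h, ih]
  | case2 p h => rw [pvMaxPow, dif_neg h]

-- the d-free recurrence that both the memo DFS and B's two phases compute
def pvF (n : Int) : Int :=
  if n < 6 then n
  else min (pvF (n - pvMaxPow 9 n 1)) (pvF (n - pvMaxPow 6 n 1)) + 1
termination_by n.toNat
decreasing_by
  · exact pvStep9Dec n (by omega)
  · exact pvStep6Dec n (by omega)

theorem pvF_small (n : Int) (h : n < 6) : pvF n = n := by rw [pvF]; simp [h]

-- A side: the memoized recursion computes pvF, and the memo only ever holds pvF values
theorem dfsGo_spec (n : Int) (m : List (Int × Int))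
    (hm : ∀ k v, List.lookup k m = some v → v = pvF k) :
    (dfsGo n m).1 = pvF n ∧
      ∀ k v, List.lookup k (dfsGo n m).2 = some v → v = pvF k := by
  fun_induction dfsGo n m with
  | case1 n m h => exact ⟨(pvF_small n h).symm, hm⟩
  | case2 n m h v hl => exact ⟨hm n v hl, hm⟩
  | case3 n m h hl max9 max6 r9 r6 v ih1 ih2 =>
      rename_i ih3
      obtain ⟨e9, m9⟩ := ih1 hm
      obtain ⟨e6, m6⟩ := ih3 m9
      have hv : min r9.1 r6.1 + 1 = pvF n := by
        rw [pvF, if_neg h, ← e9, ← e6]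
      refine ⟨hv, ?_⟩
      intro k w hk
      have hk' : List.lookup k (r6.2 ++ [(n, v)]) = some w := hk
      rw [List.lookup_append] at hk'
      cases hfst : List.lookup k r6.2 with
      | some u =>
          rw [hfst] at hk'
          simp only [Option.some_or, Option.some.injEq] at hk'
          exact hk' ▸ m6 k u hfst
      | none =>
          rw [hfst] at hk'
          simp only [Option.none_or] at hk'
          simp only [List.lookup] at hk'
          split at hk'
          · rename_i hkn
            cases hk'
            have hkn' : k = n := by simpa using hkn
            rw [hkn']
            exact hv
          · cases hk'

-- every state already in `seen` survives to the final collected set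
theorem pvCollect_mono (seen stack : List Int) : ∀ x ∈ seen, x ∈ pvCollect seen stack := by
  fun_induction pvCollect seen stack with
  | case1 seen => exact fun x hx => hx
  | case2 seen k rest h ih => exact ih
  | case3 seen k rest h ih =>
      intro x hx
      exact ih x ((PySem.Set.mem_add _ _ _).mpr (Or.inl hx))

-- B phase 1: the collected set is closed under taking children ≥ 6, contains the
-- pending stack entries ≥ 6, has no duplicates, and holds only states ≥ 6
theorem pvCollect_spec (seen stack : List Int)
    (hnd : seen.Nodup)
    (h6 : ∀ s ∈ seen, 6 ≤ s)
    (hcl : ∀ s ∈ seen,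
      (6 ≤ s - pvLargest 9 s 1 → s - pvLargest 9 s 1 ∈ seen ∨ s - pvLargest 9 s 1 ∈ stack) ∧
      (6 ≤ s - pvLargest 6 s 1 → s - pvLargest 6 s 1 ∈ seen ∨ s - pvLargest 6 s 1 ∈ stack)) :
    (∀ x ∈ stack, 6 ≤ x → x ∈ pvCollect seen stack) ∧
    (pvCollect seen stack).Nodup ∧
    (∀ s ∈ pvCollect seen stack, 6 ≤ s) ∧
    (∀ s ∈ pvCollect seen stack,
      (6 ≤ s - pvLargest 9 s 1 → s - pvLargest 9 s 1 ∈ pvCollect seen stack) ∧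
      (6 ≤ s - pvLargest 6 s 1 → s - pvLargest 6 s 1 ∈ pvCollect seen stack)) := by
  fun_induction pvCollect seen stack with
  | case1 seen =>
      refine ⟨by simp, hnd, h6, ?_⟩
      intro s hs
      rcases hcl s hs with ⟨c9, c6⟩
      exact ⟨fun h => (c9 h).resolve_right (by simp), fun h => (c6 h).resolve_right (by simp)⟩
  | case2 seen k rest hcond ih =>
      have hcl' : ∀ s ∈ seen,
          (6 ≤ s - pvLargest 9 s 1 → s - pvLargest 9 s 1 ∈ seen ∨ s - pvLargest 9 s 1 ∈ rest) ∧
          (6 ≤ s - pvLargest 6 s 1 → s - pvLargest 6 s 1 ∈ seen ∨ s - pvLargest 6 s 1 ∈ rest) := by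
        intro s hs
        rcases hcl s hs with ⟨c9, c6⟩
        constructor
        · intro hge
          rcases c9 hge with h' | h'
          · exact Or.inl h'
          · rcases List.mem_cons.mp h' with h'' | h''
            · rcases hcond with hk | hk
              · omega
              · exact Or.inl (h'' ▸ hk)
            · exact Or.inr h''
        · intro hge
          rcases c6 hge with h' | h'
          · exact Or.inl h'
          · rcases List.mem_cons.mp h' with h'' | h''
            · rcases hcond with hk | hk
              · omega
              · exact Or.inl (h'' ▸ hk)
            · exact Or.inr h''
      obtain ⟨ist, ind, i6, icl⟩ := ih hnd h6 hcl'
      refine ⟨?_, ind, i6, icl⟩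
      intro x hx hx6
      rcases List.mem_cons.mp hx with hx' | hx'
      · rcases hcond with hk | hk
        · omega
        · rw [hx']
          exact pvCollect_mono seen rest k hk
      · exact ist x hx' hx6
  | case3 seen k rest hcond ih =>
      have hknot : k ∉ seen := fun h => hcond (Or.inr h)
      have hk6 : ¬ k < 6 := fun h => hcond (Or.inl h)
      have hadd : PySem.Set.add seen k = seen ++ [k] := PySem.Set.add_of_not_mem hknot
      have hnd' : (PySem.Set.add seen k).Nodup := by
        rw [hadd, List.nodup_append]
        refine ⟨hnd, by simp, ?_⟩
        intro a ha b hb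
        simp at hb
        subst hb
        exact fun hak => hknot (hak ▸ ha)
      have h6' : ∀ s ∈ PySem.Set.add seen k, 6 ≤ s := by
        rw [hadd]
        intro s hs
        rcases List.mem_append.mp hs with h' | h'
        · exact h6 s h'
        · simp at h'
          omega
      have hcl' : ∀ s ∈ PySem.Set.add seen k,
          (6 ≤ s - pvLargest 9 s 1 → s - pvLargest 9 s 1 ∈ PySem.Set.add seen k ∨
            s - pvLargest 9 s 1 ∈ (k - pvLargest 6 k 1) :: (k - pvLargest 9 k 1) :: rest) ∧
          (6 ≤ s - pvLargest 6 s 1 → s - pvLargest 6 s 1 ∈ PySem.Set.add seen k ∨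
            s - pvLargest 6 s 1 ∈ (k - pvLargest 6 k 1) :: (k - pvLargest 9 k 1) :: rest) := by
        rw [hadd]
        intro s hs
        rcases List.mem_append.mp hs with h' | h'
        · rcases hcl s h' with ⟨c9, c6⟩
          constructor
          · intro hge
            rcases c9 hge with h'' | h''
            · exact Or.inl (List.mem_append.mpr (Or.inl h''))
            · rcases List.mem_cons.mp h'' with h3 | h3
              · exact Or.inl (List.mem_append.mpr (Or.inr (by simp [h3])))
              · exact Or.inr (by simp [h3])
          · intro hge
            rcases c6 hge with h'' | h''
            · exact Or.inl (List.mem_append.mpr (Or.inl h''))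
            · rcases List.mem_cons.mp h'' with h3 | h3
              · exact Or.inl (List.mem_append.mpr (Or.inr (by simp [h3])))
              · exact Or.inr (by simp [h3])
        · simp at h'
          subst h'
          exact ⟨fun _ => Or.inr (by simp), fun _ => Or.inr (by simp)⟩
      obtain ⟨ist, ind, i6, icl⟩ := ih hnd' h6' hcl'
      refine ⟨?_, ind, i6, icl⟩
      intro x hx hx6
      rcases List.mem_cons.mp hx with hx' | hx'
      · subst hx'
        exact pvCollect_mono _ _ x ((PySem.Set.mem_add _ _ _).mpr (Or.inr rfl))
      · exact ist x (by simp [hx']) hx6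

-- looking a key up in the table `l.map (k ↦ (k, f k))` of a list containing it
theorem pvLookup_map_self (f : Int → Int) (l : List Int) (x : Int) (hx : x ∈ l) :
    List.lookup x (l.map fun k => (k, f k)) = some (f x) := by
  induction l with
  | nil => cases hx
  | cons a l ih =>
      simp only [List.map_cons, List.lookup]
      cases hxa : x == a with
      | true =>
          have hx' : x = a := by simpa using hxa
          simp [hx']
      | false =>
          apply ih
          rcases List.mem_cons.mp hx with h | h
          · exfalso
            simp at hxa
            exact hxa h
          · exact h

-- B phase 2: folding pvEvalStep over a strictly increasing, child-closed list of
-- states ≥ 6 builds exactly the table of pvF values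
theorem pvEval_fold (S : List Int)
    (hpar : S.Pairwise (· < ·))
    (h6 : ∀ s ∈ S, 6 ≤ s)
    (hcl : ∀ s ∈ S,
      (6 ≤ s - pvLargest 9 s 1 → s - pvLargest 9 s 1 ∈ S) ∧
      (6 ≤ s - pvLargest 6 s 1 → s - pvLargest 6 s 1 ∈ S)) :
    ∀ suf pre, S = pre ++ suf →
      suf.foldl pvEvalStep (pre.map fun k => (k, pvF k)) = S.map fun k => (k, pvF k) := by
  intro suf
  induction suf with
  | nil => intro pre hpre; rw [hpre]; simp
  | cons k suf' ih =>
      intro pre hpre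
      have hkS : k ∈ S := by rw [hpre]; simp
      have hk6 : 6 ≤ k := h6 k hkS
      have hsplit := (List.pairwise_append.mp (hpre ▸ hpar)).2.2
      have hchild : ∀ c : Int, c ∈ S → c < k → c ∈ pre := by
        intro c hc hck
        rw [hpre] at hc
        rcases List.mem_append.mp hc with h' | h'
        · exact h'
        · exfalso
          rcases List.mem_cons.mp h' with h'' | h''
          · omega
          · have := (List.pairwise_append.mp (hpre ▸ hpar)).2.1
            have := (List.pairwise_cons.mp this).1 c h''
            omega
      have hstep : pvEvalStep (pre.map fun k => (k, pvF k)) k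
          = (pre ++ [k]).map fun k => (k, pvF k) := by
        have hb9 := pvMaxPow_one_le 9 k 1 (by omega)
        have hb9' := pvMaxPow_le_self 9 k 1 (by omega)
        have hb6 := pvMaxPow_one_le 6 k 1 (by omega)
        have hb6' := pvMaxPow_le_self 6 k 1 (by omega)
        have ha : (if k - pvLargest 9 k 1 < 6 then k - pvLargest 9 k 1
            else (List.lookup (k - pvLargest 9 k 1) (pre.map fun k => (k, pvF k))).getD 0)
            = pvF (k - pvLargest 9 k 1) := by
          by_cases hc : k - pvLargest 9 k 1 < 6
          · rw [if_pos hc, pvF_small _ hc]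
          · rw [if_neg hc]
            have hmem : k - pvLargest 9 k 1 ∈ pre := by
              apply hchild _ ((hcl k hkS).1 (by omega))
              rw [pvLargest_eq]
              omega
            rw [pvLookup_map_self pvF pre _ hmem]
            rfl
        have hb : (if k - pvLargest 6 k 1 < 6 then k - pvLargest 6 k 1
            else (List.lookup (k - pvLargest 6 k 1) (pre.map fun k => (k, pvF k))).getD 0)
            = pvF (k - pvLargest 6 k 1) := by
          by_cases hc : k - pvLargest 6 k 1 < 6
          · rw [if_pos hc, pvF_small _ hc]
          · rw [if_neg hc]
            have hmem : k - pvLargest 6 k 1 ∈ pre := by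
              apply hchild _ ((hcl k hkS).2 (by omega))
              rw [pvLargest_eq]
              omega
            rw [pvLookup_map_self pvF pre _ hmem]
            rfl
        have hv : min (pvF (k - pvLargest 9 k 1)) (pvF (k - pvLargest 6 k 1)) + 1 = pvF k := by
          rw [pvLargest_eq, pvLargest_eq]
          conv_rhs => rw [pvF]
          rw [if_neg (by omega)]
        simp only [pvEvalStep]
        rw [ha, hb, hv, List.map_append]
        simp
      rw [List.foldl_cons, hstep, ih (pre ++ [k]) (by rw [hpre]; simp)]

-- ===== VERDICT (by name: the statement is the Claim_ definition above) =====
theorem dfs_spec : Claim_equal_dfs := by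
  intro n d _
  unfold Spec_dfs dfs dfs_alt
  by_cases hn : n < 6
  · rw [if_pos hn, if_pos hn]
  · rw [if_neg hn, if_neg hn]
    cases hl : List.lookup n d with
    | some v => rfl
    | none =>
      obtain ⟨e9, m9⟩ := dfsGo_spec (n - pvMaxPow 9 n 1) [] (by simp)
      obtain ⟨e6, _⟩ := dfsGo_spec (n - pvMaxPow 6 n 1) _ m9
      simp only []
      rw [e9, e6]
      -- phase 1 facts
      obtain ⟨ist, ind, i6, icl⟩ := pvCollect_spec [] [n] (by simp) (by simp) (by simp)
      have hnS : n ∈ pvCollect [] [n] := ist n (by simp) (by omega)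
      -- the sorted reachable list
      set L := PySem.List.sorted (pvCollect [] [n]) (fun x => x) false with hLdefL
      have hperm : L.Perm (pvCollect [] [n]) := PySem.List.sorted_perm _ _ _
      have hmemL : ∀ x : Int, x ∈ L ↔ x ∈ pvCollect [] [n] := fun x => hperm.mem_iff
      have hndL : L.Nodup := hperm.nodup_iff.mpr ind
      have hparL : L.Pairwise (· < ·) := by
        have hle : L.Pairwise (fun a b => a ≤ b) := PySem.List.sorted_pairwise _ _
        exact (hle.and hndL).imp (fun h => lt_of_le_of_ne h.1 h.2)
      have h6L : ∀ s ∈ L, 6 ≤ s := fun s hs => i6 s ((hmemL s).mp hs)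
      have hclL : ∀ s ∈ L,
          (6 ≤ s - pvLargest 9 s 1 → s - pvLargest 9 s 1 ∈ L) ∧
          (6 ≤ s - pvLargest 6 s 1 → s - pvLargest 6 s 1 ∈ L) := by
        intro s hs
        rcases icl s ((hmemL s).mp hs) with ⟨c9, c6⟩
        exact ⟨fun h => (hmemL _).mpr (c9 h), fun h => (hmemL _).mpr (c6 h)⟩
      have hfold := pvEval_fold L hparL h6L hclL L [] (by simp)
      simp only [List.map_nil] at hfold
      rw [hfold]
      rw [pvLookup_map_self pvF L n ((hmemL n).mpr hnS)]
      have : min (pvF (n - pvMaxPow 9 n 1)) (pvF (n - pvMaxPow 6 n 1)) + 1 = pvF n := by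
        conv_rhs => rw [pvF]
        rw [if_neg hn]
      rw [← this]
      rfl
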